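-- pv_equiv track=rewrite | github.com/stranske/Workflows | scripts/autofix_safe_sweep.py | filter_parent_dirs
-- ===== SOURCE A (Python) =====
-- from collections.abc import Iterable
--
-- def _normalise_dir(path: str) -> str:
--     if not path:
--         return ""
--     cleaned = path.rstrip("/")
--     if cleaned.startswith("./"):
--         cleaned = cleaned[2:]
--     return cleaned or "."
--
-- def filter_parent_dirs(paths: Iterable[str]) -> list[str]:
--     """Drop subdirectories when a parent directory is already selected."""
--     filtered: list[str] = []
--     for raw in paths:
--         cleaned = _normalise_dir(raw)
--         if not cleaned:
--             continue
--         is_subdir = False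
--         for parent in filtered:
--             if cleaned != parent and cleaned.startswith(f"{parent.rstrip('/')}/"):
--                 is_subdir = True
--                 break
--         if not is_subdir:
--             filtered.append(cleaned)
--     return filtered
-- ===== SOURCE B (Python) =====
-- def _normalise_dir(path: str) -> str:
--     if not path:
--         return ""
--     cleaned = path.rstrip("/")
--     if cleaned.startswith("./"):
--         cleaned = cleaned[2:]
--     return cleaned or "."
--
--
-- def filter_parent_dirs(paths):
--     """Drop subdirectories when a parent directory is already selected.
--
--     One pass with a hash set of the selected directories: a path is a
--     subdirectory iff one of its proper prefixes ending at a '/' is in the set.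
--     """
--     filtered: list[str] = []
--     chosen: set[str] = set()
--     for raw in paths:
--         cleaned = _normalise_dir(raw)
--         if not cleaned:
--             continue
--         if not any(ch == "/" and cleaned[:i] in chosen
--                    for i, ch in enumerate(cleaned)):
--             filtered.append(cleaned)
--             chosen.add(cleaned)
--     return filtered
-- ===== Notes on version B (the rewrite author's own statement) =====
-- stated objective: faster
-- what changed: A scans every already-selected directory and tests startswith for each new path; B keeps the selected directories in a hash set and tests each '/'-delimited proper prefix of the new path for membership, removing the inner scan over the selection.
import Mathlib
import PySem

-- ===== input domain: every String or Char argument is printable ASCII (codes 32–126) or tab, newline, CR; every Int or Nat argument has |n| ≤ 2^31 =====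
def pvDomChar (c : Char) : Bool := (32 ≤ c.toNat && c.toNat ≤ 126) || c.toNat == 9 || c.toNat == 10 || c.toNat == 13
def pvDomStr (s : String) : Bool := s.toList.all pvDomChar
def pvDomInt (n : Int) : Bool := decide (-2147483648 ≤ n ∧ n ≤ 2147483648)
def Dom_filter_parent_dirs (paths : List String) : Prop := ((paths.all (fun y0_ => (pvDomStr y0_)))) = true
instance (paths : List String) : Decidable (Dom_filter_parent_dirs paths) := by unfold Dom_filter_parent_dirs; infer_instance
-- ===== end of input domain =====

-- B replaces A's inner scan over the already-selected directories by a hash-set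
-- membership test of each '/'-delimited proper prefix of the path (objective: faster).

-- ===== PORT A =====

-- path.rstrip("/"): remove all trailing '/' characters (hand port, exact: PySem has no per-side stripChars)
def pvRstripSlash (cs : List Char) : List Char := ((cs.reverse).dropWhile (fun c => c == '/')).reverse

-- _normalise_dir (defined identically in both Source A and Source B)
def pvNormaliseDir (path : String) : String :=
  if path.toList = [] then ""                        -- `if not path: return ""`
  else
    let cleaned := pvRstripSlash path.toList
    let cleaned := if PySem.Chars.startswith cleaned ['.', '/']
                   then PySem.List.slice cleaned (some 2) none   -- cleaned[2:]
                   else cleaned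
    if cleaned = [] then "." else String.ofList cleaned          -- `return cleaned or "."`

-- inner `for parent in filtered: … break` loop of A
def pvIsSubdir (cleaned : List Char) : List String → Bool
  | [] => false
  | parent :: rest =>
      if cleaned != parent.toList
         && PySem.Chars.startswith cleaned (pvRstripSlash parent.toList ++ ['/'])
      then true
      else pvIsSubdir cleaned rest

-- body of A's outer loop
def pvStepA (filtered : List String) (raw : String) : List String :=
  let cleaned := pvNormaliseDir raw
  if cleaned.toList = [] then filtered               -- `if not cleaned: continue`
  else if pvIsSubdir cleaned.toList filtered then filtered
  else filtered ++ [cleaned]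

def filter_parent_dirs (paths : List String) : List String :=
  paths.foldl pvStepA []

-- ===== PORT B =====

-- `any(ch == "/" and cleaned[:i] in chosen for i, ch in enumerate(cleaned))`
def pvHasChosenPrefix (cleaned : List Char) (chosen : PySem.Set String) : Bool :=
  (PySem.List.enumerate cleaned).any (fun p =>
    p.2 == '/' && chosen.contains (String.ofList (PySem.List.slice cleaned none (some p.1))))

-- body of B's loop; state = (filtered, chosen)
def pvStepB (st : List String × PySem.Set String) (raw : String) : List String × PySem.Set String :=
  let cleaned := pvNormaliseDir raw
  if cleaned.toList = [] then st
  else if pvHasChosenPrefix cleaned.toList st.2 then st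
  else (st.1 ++ [cleaned], st.2.add cleaned)

def filter_parent_dirs_alt (paths : List String) : List String :=
  (paths.foldl pvStepB ([], PySem.Set.empty)).1

-- ===== PRECONDITION & SPEC =====
def Spec_filter_parent_dirs (paths : List String) (out : List String) : Prop := out = filter_parent_dirs_alt paths
instance (paths : List String) (out : List String) : Decidable (Spec_filter_parent_dirs paths out) := by unfold Spec_filter_parent_dirs; infer_instance

-- ===== CLAIM (what is proved, stated in full; the proofs are below) =====
def Claim_equal_filter_parent_dirs : Prop := ∀ (paths : List String), Dom_filter_parent_dirs paths → Spec_filter_parent_dirs paths (filter_parent_dirs paths)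

-- ===== LEMMAS AND PROOFS =====

lemma pvRstripSlash_of_getLast (cs : List Char)
    (h : ∀ c ∈ cs.getLast?, (c == '/') = false) : pvRstripSlash cs = cs := by
  unfold pvRstripSlash
  rw [List.dropWhile_eq_self_iff.mpr, List.reverse_reverse]
  intro hpos
  have hm : cs.reverse[0] ∈ cs.getLast? := by
    rw [← List.head?_reverse, List.head?_eq_getElem?, List.getElem?_eq_getElem hpos]
    exact rfl
  have := h _ hm
  simp at this ⊢
  simpa [List.getElem_reverse] using this

lemma pvRstripSlash_getLast (cs : List Char) :
    ∀ c ∈ (pvRstripSlash cs).getLast?, (c == '/') = false := by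
  intro c hc
  unfold pvRstripSlash at hc
  rw [List.getLast?_reverse] at hc
  have := List.head?_dropWhile_not (fun c => c == '/') cs.reverse
  rw [hc] at this
  exact this

lemma getLast?_drop_ne (l : List Char) (n : Nat) (h : l.drop n ≠ []) :
    (l.drop n).getLast? = l.getLast? := by
  rw [List.getLast?_drop]
  simp only [ite_eq_right_iff]
  intro hle
  exact absurd (List.drop_eq_nil_iff.mpr (by omega)) h

lemma pvNormaliseDir_fixed (raw : String) :
    pvRstripSlash (pvNormaliseDir raw).toList = (pvNormaliseDir raw).toList := by
  unfold pvNormaliseDir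
  simp only []
  split
  · decide
  · set c2 := (if PySem.Chars.startswith (pvRstripSlash raw.toList) ['.', '/'] = true
        then PySem.List.slice (pvRstripSlash raw.toList) (some 2) none
        else pvRstripSlash raw.toList) with hc2
    split
    · decide
    · rename_i h2
      rw [String.toList_ofList]
      apply pvRstripSlash_of_getLast
      rw [hc2] at h2 ⊢
      split at h2
      · rename_i hs
        rw [if_pos hs]
        rw [PySem.List.slice_from _ (by omega)] at h2 ⊢
        intro c hc
        rw [getLast?_drop_ne _ _ h2] at hc
        exact pvRstripSlash_getLast _ c hc
      · rename_i hs
        rw [if_neg hs]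
        exact fun c hc => pvRstripSlash_getLast _ c hc

lemma pvIsSubdir_iff (cleaned : List Char) (l : List String) :
    pvIsSubdir cleaned l = true ↔
      ∃ p ∈ l, (cleaned != p.toList
        && PySem.Chars.startswith cleaned (pvRstripSlash p.toList ++ ['/'])) = true := by
  induction l with
  | nil => simp [pvIsSubdir]
  | cons parent rest ih =>
    unfold pvIsSubdir
    split
    · rename_i hcond
      simp only [true_iff]
      exact ⟨parent, List.mem_cons_self, hcond⟩
    · rename_i hcond
      rw [ih]
      constructor
      · rintro ⟨p, hp, hc⟩; exact ⟨p, List.mem_cons_of_mem _ hp, hc⟩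
      · rintro ⟨p, hp, hc⟩
        rcases List.mem_cons.mp hp with rfl | hp'
        · exact absurd hc (by simpa using hcond)
        · exact ⟨p, hp', hc⟩

lemma pvInner_eq (cleaned : List Char) (fa : List String) (ch : PySem.Set String)
    (hmem : ∀ x, x ∈ ch ↔ x ∈ fa)
    (hfix : ∀ p ∈ fa, pvRstripSlash p.toList = p.toList) :
    pvIsSubdir cleaned fa = pvHasChosenPrefix cleaned ch := by
  rw [Bool.eq_iff_iff, pvIsSubdir_iff]
  unfold pvHasChosenPrefix
  rw [List.any_eq_true]
  constructor
  · rintro ⟨p, hp, hc⟩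
    rw [Bool.and_eq_true, PySem.Chars.startswith_iff, hfix p hp] at hc
    obtain ⟨-, t, ht⟩ := hc
    subst ht
    refine ⟨((0 : Int) + p.toList.length, '/'), ?_, ?_⟩
    · rw [PySem.List.mem_enumerate_iff]
      refine ⟨p.toList.length, by simp, ?_⟩
      refine Prod.ext rfl ?_
      simp
    · simp only [beq_self_eq_true, Bool.true_and]
      rw [zero_add, PySem.List.slice_to _ (by positivity), Int.toNat_natCast,
          List.append_assoc, List.take_left, String.ofList_toList]
      exact (PySem.Set.contains_iff ch p).mpr ((hmem p).mpr hp)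
  · rintro ⟨⟨i, c⟩, hq, hc⟩
    rw [PySem.List.mem_enumerate_iff] at hq
    obtain ⟨k, hk, hik⟩ := hq
    have hi : (0 : Int) + k = i := (congrArg Prod.fst hik).symm
    have hck : cleaned[k] = c := (congrArg Prod.snd hik).symm
    rw [← hi, ← hck] at hc
    rw [Bool.and_eq_true, beq_iff_eq] at hc
    obtain ⟨hslash, hcont⟩ := hc
    simp only at hslash
    rw [zero_add, PySem.List.slice_to _ (by positivity), Int.toNat_natCast] at hcont
    set s := String.ofList (cleaned.take k) with hs
    have hsfa : s ∈ fa := (hmem s).mp ((PySem.Set.contains_iff ch s).mp hcont)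
    have hsl : s.toList = cleaned.take k := String.toList_ofList
    refine ⟨s, hsfa, ?_⟩
    rw [Bool.and_eq_true, bne_iff_ne, PySem.Chars.startswith_iff, hfix s hsfa, hsl]
    constructor
    · intro heq
      have := congrArg List.length heq
      simp [Nat.min_eq_left (Nat.le_of_lt hk)] at this
      omega
    · refine ⟨cleaned.drop (k+1), ?_⟩
      rw [← hslash, List.append_assoc, List.singleton_append,
          List.getElem_cons_drop, List.take_append_drop]

lemma pvFold_eq (paths : List String) (fa : List String) (st : List String × PySem.Set String)
    (h1 : st.1 = fa) (hmem : ∀ x, x ∈ st.2 ↔ x ∈ fa)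
    (hfix : ∀ p ∈ fa, pvRstripSlash p.toList = p.toList) :
    (paths.foldl pvStepB st).1 = paths.foldl pvStepA fa := by
  induction paths generalizing fa st with
  | nil => simpa using h1
  | cons raw rest ih =>
    simp only [List.foldl_cons]
    set cleaned := pvNormaliseDir raw with hcl
    by_cases hempty : cleaned.toList = []
    · rw [show pvStepB st raw = st from by simp [pvStepB, ← hcl, hempty],
          show pvStepA fa raw = fa from by simp [pvStepA, ← hcl, hempty]]
      exact ih fa st h1 hmem hfix
    · have hinner : pvIsSubdir cleaned.toList fa = pvHasChosenPrefix cleaned.toList st.2 :=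
        pvInner_eq _ _ _ hmem hfix
      by_cases hsub : pvIsSubdir cleaned.toList fa = true
      · rw [show pvStepB st raw = st from by
              simp [pvStepB, ← hcl, hempty, ← hinner, hsub],
            show pvStepA fa raw = fa from by simp [pvStepA, ← hcl, hempty, hsub]]
        exact ih fa st h1 hmem hfix
      · rw [show pvStepB st raw = (st.1 ++ [cleaned], st.2.add cleaned) from by
              simp [pvStepB, ← hcl, hempty, ← hinner, hsub],
            show pvStepA fa raw = fa ++ [cleaned] from by simp [pvStepA, ← hcl, hempty, hsub]]
      
        refine ih (fa ++ [cleaned]) _ (by simp [h1]) ?_ ?_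
        · intro x
          rw [show (st.1 ++ [cleaned], st.2.add cleaned).2 = st.2.add cleaned from rfl,
              PySem.Set.mem_add, hmem x]
          simp
        · intro p hp
          rcases List.mem_append.mp hp with h | h
          · exact hfix p h
          · rw [List.mem_singleton.mp h]
            exact pvNormaliseDir_fixed raw

-- ===== VERDICT (by name: the statement is the Claim_ definition above) =====
theorem filter_parent_dirs_spec : Claim_equal_filter_parent_dirs := by
  intro paths _
  unfold Spec_filter_parent_dirs filter_parent_dirs filter_parent_dirs_alt
  exact (pvFold_eq paths [] ([], PySem.Set.empty) rfl (by simp [PySem.Set.empty]) (by simp)).symm
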